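-- pv_equiv track=rewrite | github.com/Eeeeelias/miniguept-chat | backend/chatty.py | split_reply
-- ===== SOURCE A (Python) =====
-- def split_reply(reply):
--     k = 0
--     replies = []
--     for i in range(len(reply)):
--         if reply[i] == '#':
--             replies.append(reply[k:i])
--             k = i + 2
--     if len(replies) == 0:
--         replies.append(reply)
--     return replies
-- ===== SOURCE B (Python) =====
-- def split_reply(reply):
--     parts = reply.split('#')
--     return [parts[0]] + [p[1:] for p in parts[1:-1]]
-- ===== Notes on version B (the rewrite author's own statement) =====
-- stated objective: simpler
-- what changed: B replaces A's per-character index loop with manual k/i slice bookkeeping by one str.split call on the marker plus a comprehension that keeps the first piece and drops the leading character of each middle piece (discarding the last piece).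
import Mathlib
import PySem

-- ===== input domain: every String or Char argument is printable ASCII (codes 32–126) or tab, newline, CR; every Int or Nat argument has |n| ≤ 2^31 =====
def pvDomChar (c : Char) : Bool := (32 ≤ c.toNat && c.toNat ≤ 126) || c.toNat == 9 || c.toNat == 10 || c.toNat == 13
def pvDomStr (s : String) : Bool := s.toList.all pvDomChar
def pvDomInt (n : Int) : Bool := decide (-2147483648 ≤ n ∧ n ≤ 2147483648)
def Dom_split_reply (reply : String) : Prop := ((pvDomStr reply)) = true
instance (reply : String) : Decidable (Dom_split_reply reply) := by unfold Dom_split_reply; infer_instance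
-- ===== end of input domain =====

-- B replaces A's index-scanning loop (manual slice bookkeeping) by a single split('#')
-- plus a comprehension over the middle pieces: simpler, same exact output.

-- ===== PORT A =====
-- literal port of A: scan indices 0..len-1, on '#' append reply[k:i] and set k = i+2
def split_reply (reply : String) : List String :=
  let st := (PySem.List.pyRange 0 (PySem.Str.len reply) 1).foldl
    (fun (st : Int × List String) i =>
      if PySem.Str.pyGet? reply i = some '#' then
        (i + 2, st.2 ++ [PySem.Str.slice reply (some st.1) (some i)])
      else st) (0, [])
  if st.2 = [] then [reply] else st.2

-- ===== PORT B =====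
-- literal port of B: parts = reply.split('#'); [parts[0]] + [p[1:] for p in parts[1:-1]]
def split_reply_alt (reply : String) : List String :=
  match PySem.Str.split? reply "#" with
  | none => []          -- unreachable: the separator "#" is nonempty
  | some parts =>
      parts.headD "" ::
        (PySem.List.slice parts (some 1) (some (-1))).map
          (fun p => PySem.Str.slice p (some 1) none)

-- ===== PRECONDITION & SPEC =====
def Spec_split_reply (reply : String) (out : List String) : Prop := out = split_reply_alt reply
instance (reply : String) (out : List String) : Decidable (Spec_split_reply reply out) := by unfold Spec_split_reply; infer_instance

-- ===== CLAIM (what is proved, stated in full; the proofs are below) =====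
def Claim_equal_split_reply : Prop := ∀ (reply : String), Dom_split_reply reply → Spec_split_reply reply (split_reply reply)

-- ===== LEMMAS AND PROOFS =====

-- recursive model of A's scanning loop: skip = "previous char was '#'" (its successor
-- is excluded from the pending segment), pend = chars of the current segment so far
def pvM : Bool → List Char → List Char → List (List Char)
  | _, _, [] => []
  | skip, pend, c :: rest =>
      if c = '#' then pend.reverse :: pvM true [] rest
      else pvM false (cond skip pend (c :: pend)) rest

-- recursive model of split('#')
def pvS : List Char → List (List Char)
  | [] => [[]]
  | c :: rest => if c = '#' then [] :: pvS rest else (pvS rest).modifyHead (c :: ·)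

theorem pvS_ne_nil (cs : List Char) : pvS cs ≠ [] := by
  induction cs with
  | nil => simp [pvS]
  | cons c rest ih =>
    simp only [pvS]
    split
    · simp
    · cases h : pvS rest with
      | nil => exact absurd h ih
      | cons p ps => simp

theorem pvS_single (cs : List Char) (p : List Char) (h : pvS cs = [p]) : p = cs := by
  induction cs generalizing p with
  | nil => simp [pvS] at h; simp [h]
  | cons c rest ih =>
    simp only [pvS] at h
    split at h
    · rename_i hc
      have := pvS_ne_nil rest
      cases heq : pvS rest <;> simp_all
    · cases heq : pvS rest with
      | nil => exact absurd heq (pvS_ne_nil rest)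
      | cons q qs =>
        rw [heq] at h
        simp [List.modifyHead] at h
        obtain ⟨h1, h2⟩ := h
        subst h2
        have := ih q (by rw [heq])
        simp [← h1, this]

-- the value B builds from the split pieces
def pvBuild (pre : List Char) : List (List Char) → List (List Char)
  | [] => []
  | [_] => []
  | p :: ps => (pre ++ p) :: ps.dropLast.map (List.drop 1)

theorem pvM_false (cs : List Char) :
    (∀ pend, pvM false pend cs = pvBuild pend.reverse (pvS cs)) ∧
    pvM true [] cs = (pvS cs).dropLast.map (List.drop 1) := by
  induction cs with
  | nil => simp [pvM, pvS, pvBuild]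
  | cons c rest ih =>
    obtain ⟨ihf, iht⟩ := ih
    by_cases hc : c = '#'
    · subst hc
      constructor
      · intro pend
        simp only [pvM, pvS, if_pos rfl]
        rw [iht]
        cases h : pvS rest with
        | nil => exact absurd h (pvS_ne_nil rest)
        | cons q qs => simp [pvBuild, pvS_ne_nil]
      · simp only [pvM, pvS, if_pos rfl]
        rw [iht]
        cases h : pvS rest with
        | nil => exact absurd h (pvS_ne_nil rest)
        | cons q qs => simp [pvBuild]
    · constructor
      · intro pend
        simp only [pvM, pvS, if_neg hc]
        simp only [cond]
        rw [ihf (c :: pend)]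
        cases h : pvS rest with
        | nil => exact absurd h (pvS_ne_nil rest)
        | cons q qs =>
          cases qs with
          | nil => simp [pvBuild, List.modifyHead]
          | cons r rs => simp [pvBuild, List.modifyHead]
      · simp only [pvM, pvS, if_neg hc, if_neg]
        simp only [cond]
        rw [ihf []]
        cases h : pvS rest with
        | nil => exact absurd h (pvS_ne_nil rest)
        | cons q qs =>
          cases qs with
          | nil => simp [pvBuild, List.modifyHead]
          | cons r rs => simp [pvBuild, List.modifyHead]

-- splitOn with a one-char separator computes pvS
theorem pvS_go (fuel : Nat) (l cur : List Char) (acc : List (List Char))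
    (h : l.length < fuel) :
    PySem.Chars.splitOn.go ['#'] fuel l cur acc =
      acc.reverse ++ (pvS l).modifyHead (cur.reverse ++ ·) := by
  induction fuel generalizing l cur acc with
  | zero => omega
  | succ f ih =>
    cases l with
    | nil => simp [PySem.Chars.splitOn.go, pvS]
    | cons c rest =>
      rw [PySem.Chars.splitOn.go]
      by_cases hc : c = '#'
      · subst hc
        have hp : List.isPrefixOf ['#'] ('#' :: rest) = true := by
          simp [List.isPrefixOf]
        rw [if_pos hp]
        rw [ih _ _ _ (by simp at h ⊢; omega)]
        simp only [pvS, if_pos rfl]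
        cases hs : pvS rest with
        | nil => exact absurd hs (pvS_ne_nil rest)
        | cons q qs => simp [hs, List.modifyHead]
      · have hp : List.isPrefixOf ['#'] (c :: rest) = false := by
          simp [List.isPrefixOf]
          intro hh
          exact absurd hh.symm hc
        rw [if_neg (by simp [hp])]
        rw [ih _ _ _ (by simp at h ⊢; omega)]
        simp only [pvS, if_neg hc]
        cases hs : pvS rest with
        | nil => exact absurd hs (pvS_ne_nil rest)
        | cons q qs => simp [List.modifyHead]

theorem pvSplitOn (cs : List Char) :
    PySem.Chars.splitOn cs ['#'] = pvS cs := by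
  have := pvS_go (cs.length + 1) cs [] [] (by omega)
  rw [PySem.Chars.splitOn, this]
  cases hs : pvS cs with
  | nil => exact absurd hs (pvS_ne_nil cs)
  | cons q qs => simp [List.modifyHead]

-- A's loop, restated on the character list (definitionally equal to the port's fold)
def pvAfold (cs : List Char) : Int × List String :=
  (PySem.List.pyRange 0 (cs.length : Int) 1).foldl
    (fun (st : Int × List String) i =>
      if PySem.List.pyGet? cs i = some '#' then
        (i + 2, st.2 ++ [String.ofList (PySem.List.slice cs (some st.1) (some i))])
      else st) (0, [])

-- loop invariant: processing indices [m, n) from state (k, acc) appends pvM's output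
theorem pvFold (cs : List Char) (m k : Nat) (acc : List String)
    (hk : k ≤ m + 1) (hm : m ≤ cs.length) :
    ((PySem.List.pyRange (m : Int) (cs.length : Int) 1).foldl
      (fun (st : Int × List String) i =>
        if PySem.List.pyGet? cs i = some '#' then
          (i + 2, st.2 ++ [String.ofList (PySem.List.slice cs (some st.1) (some i))])
        else st) ((k : Int), acc)).2 =
      acc ++ (pvM (decide (k = m + 1)) ((List.take (m - k) (List.drop k cs)).reverse)
        (List.drop m cs)).map String.ofList := by
  induction hfuel : cs.length - m generalizing m k acc with
  | zero =>
    have hmn : m = cs.length := by omega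
    subst hmn
    rw [PySem.List.pyRange_one_eq_nil (by omega)]
    simp [pvM]
  | succ f ih =>
    have hlt : m < cs.length := by omega
    rw [PySem.List.pyRange_one_cons (by exact_mod_cast hlt)]
    simp only [List.foldl_cons]
    have hget : PySem.List.pyGet? cs (m : Int) = some cs[m] := by
      rw [PySem.List.pyGet?_natCast]
      exact List.getElem?_eq_getElem hlt
    have hdropm : List.drop m cs = cs[m] :: List.drop (m + 1) cs :=
      (List.getElem_cons_drop hlt).symm
    by_cases hc : cs[m] = '#'
    · rw [hget, if_pos (by rw [hc])]
      rw [show ((m : Int) + 2) = ((m + 2 : Nat) : Int) by push_cast; ring]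
      rw [show ((m : Int) + 1) = ((m + 1 : Nat) : Int) by push_cast; ring]
      rw [ih (m + 1) (m + 2) _ (by omega) (by omega) (by omega)]
      rw [hdropm, hc]
      simp only [pvM, if_pos rfl]
      rw [PySem.List.slice_natCast]
      simp [show m + 1 - (m + 2) = 0 by omega]
    · rw [hget, if_neg (by simp [hc])]
      rw [show ((m : Int) + 1) = ((m + 1 : Nat) : Int) by push_cast; ring]
      rw [ih (m + 1) k _ (by omega) (by omega) (by omega)]
      rw [hdropm]
      simp only [pvM, if_neg hc]
      have hb : (decide (k = m + 1 + 1)) = false := by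
        apply decide_eq_false; omega
      rw [hb]
      have hpend : (List.take (m + 1 - k) (List.drop k cs)).reverse
          = cond (decide (k = m + 1)) ((List.take (m - k) (List.drop k cs)).reverse)
              (cs[m] :: (List.take (m - k) (List.drop k cs)).reverse) := by
        by_cases hk1 : k = m + 1
        · subst hk1
          rw [decide_eq_true rfl]
          simp [show m + 1 - (m + 1) = 0 by omega, show m - (m + 1) = 0 by omega]
        · rw [decide_eq_false hk1]
          have htake : List.take (m + 1 - k) (List.drop k cs)
              = List.take (m - k) (List.drop k cs) ++ [cs[m]] := by
            rw [show m + 1 - k = (m - k) + 1 by omega, List.take_succ]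
            congr 1
            rw [List.getElem?_drop, show k + (m - k) = m by omega]
            simp [List.getElem?_eq_getElem hlt]
          rw [htake]
          simp
      rw [hpend]

-- List-level reading of B's parts[1:-1]
theorem pvSliceMid {α : Type} (xs : List α) :
    PySem.List.slice xs (some 1) (some (-1)) = xs.tail.dropLast := by
  cases xs with
  | nil => simp [PySem.List.slice, PySem.List.clampIdx]
  | cons x rest =>
    rw [show PySem.List.slice (x :: rest) (some 1) (some (-1))
        = List.take (PySem.List.clampIdx (rest.length + 1) (-1)
            - PySem.List.clampIdx (rest.length + 1) 1)
            (List.drop (PySem.List.clampIdx (rest.length + 1) 1) (x :: rest)) from rfl]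
    have ha : PySem.List.clampIdx (rest.length + 1) 1 = 1 := by
      simp [PySem.List.clampIdx]
    have hbv : PySem.List.clampIdx (rest.length + 1) (-1) = rest.length := by
      simp [PySem.List.clampIdx] <;> omega
    rw [ha, hbv]
    simp [List.dropLast_eq_take]

-- B's split pieces are pvS of the character list
theorem pvParts (reply : String) :
    PySem.Str.split? reply "#" = some ((pvS reply.toList).map String.ofList) := by
  have hb := PySem.Str.split?_map reply "#"
  rw [show ("#" : String).toList = ['#'] from rfl] at hb
  rw [PySem.Chars.split?] at hb
  rw [if_neg (by simp)] at hb
  rw [pvSplitOn] at hb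
  cases hp : PySem.Str.split? reply "#" with
  | none => rw [hp] at hb; simp at hb
  | some parts =>
    rw [hp] at hb
    simp only [Option.map_some, Option.some.injEq] at hb
    congr 1
    rw [← hb]
    rw [List.map_map]
    rw [show (String.ofList ∘ String.toList) = id from funext (fun t => by simp), List.map_id]

-- ===== VERDICT (by name: the statement is the Claim_ definition above) =====
theorem split_reply_spec : Claim_equal_split_reply := by
  unfold Claim_equal_split_reply
  intro reply _
  unfold Spec_split_reply
  have hA : split_reply reply =
      (if (pvAfold reply.toList).2 = [] then [reply] else (pvAfold reply.toList).2) := rfl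
  have hfold : (pvAfold reply.toList).2 = (pvM false [] reply.toList).map String.ofList := by
    rw [pvAfold]
    rw [show (0 : Int) = ((0 : Nat) : Int) from rfl]
    rw [pvFold reply.toList 0 0 [] (by omega) (by omega)]
    rfl
  have hM := (pvM_false reply.toList).1 []
  simp only [List.reverse_nil] at hM
  rw [hA, hfold, hM]
  simp only [split_reply_alt, pvParts reply]
  rw [pvSliceMid]
  cases hs : pvS reply.toList with
  | nil => exact absurd hs (pvS_ne_nil reply.toList)
  | cons p ps =>
    cases ps with
    | nil =>
      have hp : p = reply.toList := pvS_single _ _ hs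
      simp [pvBuild, hp]
    | cons q qs =>
      simp only [pvBuild, List.map_cons, List.headD_cons, List.tail_cons]
      rw [if_neg (by simp)]
      simp only [List.nil_append]
      congr 1
      rw [show String.ofList q :: List.map String.ofList qs = List.map String.ofList (q :: qs) from rfl]
      rw [← List.map_dropLast, List.map_map, List.map_map]
      apply List.map_congr_left
      intro a _
      show String.ofList (List.drop 1 a) = PySem.Str.slice (String.ofList a) (some 1) none
      rw [PySem.Str.slice]
      rw [show (String.ofList a).toList = a from by simp]
      rw [show PySem.Chars.slice a (some 1) none = PySem.List.slice a (some 1) none from rfl]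
      rw [PySem.List.slice_from a (by norm_num)]
      rfl
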